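-- pv_equiv track=rewrite | github.com/neumanh/IgTreeZ | trunk_remover.py | search_by_and
-- ===== SOURCE A (Python) =====
-- def search_by_and(tree_dicts: dict, and_pops: list):
--     """
--     Collects the trees with all of the given populations.
--     :param tree_dicts: The tree-name: populations dictionary
--     :param and_pops: The populations to search for
--     :return: The relevant tree file list
--     """
--     filtered_trees = []
--     for tree_file in tree_dicts:
--         tree_pops = tree_dicts[tree_file]
--         all_pops_flag = True
--         for pop in and_pops:
--             if pop not in tree_pops:
--                 all_pops_flag = False  # At least One pop is not in the tree
--         if all_pops_flag:
--             filtered_trees.append(tree_file)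
--
--     return filtered_trees
-- ===== SOURCE B (Python) =====
-- def search_by_and(tree_dicts: dict, and_pops: list):
--     """Inverted-index re-implementation: build pop -> set-of-trees once, intersect."""
--     index = {}
--     for tree_file, tree_pops in tree_dicts.items():
--         for pop in tree_pops:
--             index.setdefault(pop, set()).add(tree_file)
--     if not and_pops:
--         return list(tree_dicts)
--     matching = index.get(and_pops[0], set())
--     for pop in and_pops[1:]:
--         matching = matching & index.get(pop, set())
--     return [tree_file for tree_file in tree_dicts if tree_file in matching]
-- ===== Notes on version B (the rewrite author's own statement) =====
-- stated objective: faster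
-- what changed: B builds an inverted index (population -> set of tree files) in one pass, intersects the index sets of the required populations, and rebuilds the result by filtering tree_dicts in order, replacing A's per-tree linear membership scan of every tree's population list for every required population; Pre_ only requires unique keys, i.e. that the association list really encodes a Python dict.
import Mathlib
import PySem

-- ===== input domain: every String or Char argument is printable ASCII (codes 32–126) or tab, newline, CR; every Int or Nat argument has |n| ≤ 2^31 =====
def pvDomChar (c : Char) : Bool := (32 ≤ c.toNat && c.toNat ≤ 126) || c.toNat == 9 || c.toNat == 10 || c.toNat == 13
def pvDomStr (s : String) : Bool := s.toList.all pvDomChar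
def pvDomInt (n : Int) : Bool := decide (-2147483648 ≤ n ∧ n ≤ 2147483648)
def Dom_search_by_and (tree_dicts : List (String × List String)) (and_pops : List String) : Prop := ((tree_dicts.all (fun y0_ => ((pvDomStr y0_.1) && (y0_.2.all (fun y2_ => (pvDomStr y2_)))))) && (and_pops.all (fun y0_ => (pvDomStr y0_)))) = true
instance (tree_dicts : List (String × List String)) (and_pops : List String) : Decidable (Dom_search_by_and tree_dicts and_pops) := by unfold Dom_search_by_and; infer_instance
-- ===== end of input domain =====

-- B replaces A's per-tree membership scan by one inverted index (pop -> set of trees) plus a set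
-- intersection and an order-preserving filter; objective: faster (index build + set intersection vs per-tree list scans).

-- ===== PORT A =====
-- 'for tree_file in tree_dicts: tree_pops = tree_dicts[tree_file]': iterate the dict's key order,
-- looking each key up again (first match); the inner loop sets the flag without breaking.
def search_by_and (tree_dicts : List (String × List String)) (and_pops : List String) : List String :=
  tree_dicts.foldl (fun filtered_trees kv =>
    let tree_pops := (PySem.Dict.mk tree_dicts).getD kv.1 []
    let all_pops_flag := and_pops.foldl (fun flag pop => if pop ∈ tree_pops then flag else false) true
    if all_pops_flag then filtered_trees ++ [kv.1] else filtered_trees) []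

-- ===== PORT B =====
-- index.setdefault(pop, set()).add(tree_file)  =  index[pop] = index.get(pop, set()) ∪ {tree_file}
def pvIndex (tree_dicts : List (String × List String)) : PySem.Dict String (PySem.Set String) :=
  tree_dicts.foldl (fun ix kv =>
    kv.2.foldl (fun ix pop => ix.modify pop PySem.Set.empty (fun s => PySem.Set.add s kv.1)) ix)
    PySem.Dict.empty

def search_by_and_alt (tree_dicts : List (String × List String)) (and_pops : List String) : List String :=
  let index := pvIndex tree_dicts
  match and_pops with
  | [] => tree_dicts.map Prod.fst
  | p :: rest =>
    let matching := rest.foldl (fun m pop => PySem.Set.inter m (index.getD pop PySem.Set.empty))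
      (index.getD p PySem.Set.empty)
    (tree_dicts.map Prod.fst).filter (fun f => decide (f ∈ matching))

-- ===== PRECONDITION & SPEC =====
-- Pre_ only states that tree_dicts is a genuine dict: association lists with duplicate keys do not
-- arise from a Python dict argument, and on them the two algorithms' readings legitimately differ.
def Pre_search_by_and (tree_dicts : List (String × List String)) (and_pops : List String) : Prop :=
  (tree_dicts.map Prod.fst).Nodup
instance (tree_dicts : List (String × List String)) (and_pops : List String) : Decidable (Pre_search_by_and tree_dicts and_pops) := by unfold Pre_search_by_and; infer_instance

def pvWitness_search_by_and : (List (String × List String)) × List String :=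
  ([("t1", ["a", "b"]), ("t2", ["a"])], ["a", "b"])

def Spec_search_by_and (tree_dicts : List (String × List String)) (and_pops : List String) (out : List String) : Prop := out = search_by_and_alt tree_dicts and_pops
instance (tree_dicts : List (String × List String)) (and_pops : List String) (out : List String) : Decidable (Spec_search_by_and tree_dicts and_pops out) := by unfold Spec_search_by_and; infer_instance

-- ===== CLAIM (what is proved, stated in full; the proofs are below) =====
def Claim_equal_search_by_and : Prop := ∀ (tree_dicts : List (String × List String)) (and_pops : List String), Dom_search_by_and tree_dicts and_pops → Pre_search_by_and tree_dicts and_pops → Spec_search_by_and tree_dicts and_pops (search_by_and tree_dicts and_pops)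

-- ===== LEMMAS AND PROOFS =====

-- A's inner flag loop computes 'all pops are in tree_pops'.
theorem pv_flag_eq_all (tree_pops : List String) (ap : List String) (b : Bool) :
    ap.foldl (fun flag pop => if pop ∈ tree_pops then flag else false) b
      = (b && ap.all (fun pop => decide (pop ∈ tree_pops))) := by
  induction ap generalizing b with
  | nil => simp
  | cons p rest ih =>
    simp only [List.foldl_cons, List.all_cons]
    rw [ih]
    by_cases h : p ∈ tree_pops <;> simp [h]

-- membership in the index after the inner per-tree loop
theorem pv_mem_inner (pops : List String) (f : String) (ix : PySem.Dict String (PySem.Set String))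
    (pop y : String) :
    (y ∈ (pops.foldl (fun ix p => ix.modify p PySem.Set.empty (fun s => PySem.Set.add s f)) ix).getD pop PySem.Set.empty)
      ↔ y ∈ ix.getD pop PySem.Set.empty ∨ (pop ∈ pops ∧ y = f) := by
  induction pops generalizing ix with
  | nil => simp
  | cons q rest ih =>
    simp only [List.foldl_cons]
    rw [ih]
    rw [PySem.Dict.getD_modify]
    by_cases h : pop = q
    · subst h
      simp only [if_true, PySem.Set.mem_add, List.mem_cons]
      tauto
    · simp only [if_neg h, List.mem_cons]
      tauto

-- membership in the full inverted index
theorem pv_mem_index_aux (td : List (String × List String))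
    (ix : PySem.Dict String (PySem.Set String)) (pop y : String) :
    (y ∈ (td.foldl (fun ix kv =>
        kv.2.foldl (fun ix p => ix.modify p PySem.Set.empty (fun s => PySem.Set.add s kv.1)) ix) ix).getD pop PySem.Set.empty)
      ↔ y ∈ ix.getD pop PySem.Set.empty ∨ ∃ kv ∈ td, y = kv.1 ∧ pop ∈ kv.2 := by
  induction td generalizing ix with
  | nil => simp
  | cons kv rest ih =>
    simp only [List.foldl_cons]
    rw [ih]
    rw [pv_mem_inner]
    constructor
    · rintro (( h | ⟨hp, hy⟩ ) | ⟨kv', hkv', hy, hp⟩)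
      · exact Or.inl h
      · exact Or.inr ⟨kv, List.mem_cons_self, hy, hp⟩
      · exact Or.inr ⟨kv', List.mem_cons_of_mem _ hkv', hy, hp⟩
    · rintro (h | ⟨kv', hkv', hy, hp⟩)
      · exact Or.inl (Or.inl h)
      · rcases List.mem_cons.mp hkv' with h' | h'
        · subst h'; exact Or.inl (Or.inr ⟨hp, hy⟩)
        · exact Or.inr ⟨kv', h', hy, hp⟩

theorem pv_mem_index (td : List (String × List String)) (pop y : String) :
    y ∈ (pvIndex td).getD pop PySem.Set.empty ↔ ∃ kv ∈ td, y = kv.1 ∧ pop ∈ kv.2 := by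
  unfold pvIndex
  rw [pv_mem_index_aux]
  simp [PySem.Dict.getD_empty, PySem.Set.empty]

-- membership in the intersection loop
theorem pv_mem_matching (td : List (String × List String)) (rest : List String)
    (m : PySem.Set String) (y : String) :
    (y ∈ rest.foldl (fun m pop => PySem.Set.inter m ((pvIndex td).getD pop PySem.Set.empty)) m)
      ↔ y ∈ m ∧ ∀ pop ∈ rest, y ∈ (pvIndex td).getD pop PySem.Set.empty := by
  induction rest generalizing m with
  | nil => simp
  | cons q qs ih =>
    simp only [List.foldl_cons]
    rw [ih]
    rw [PySem.Set.mem_inter]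
    constructor
    · rintro ⟨⟨h1, h2⟩, h3⟩
      refine ⟨h1, ?_⟩
      intro pop hp
      rcases List.mem_cons.mp hp with h | h
      · subst h; exact h2
      · exact h3 pop h
    · rintro ⟨h1, h2⟩
      exact ⟨⟨h1, h2 q List.mem_cons_self⟩, fun pop hp => h2 pop (List.mem_cons_of_mem _ hp)⟩

-- under unique keys, the dict lookup of an iterated key returns that entry's value
theorem pv_lookup_self (td : List (String × List String)) (h : (td.map Prod.fst).Nodup)
    (kv : String × List String) (hkv : kv ∈ td) :
    (PySem.Dict.mk td).getD kv.1 [] = kv.2 := by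
  apply PySem.Dict.getD_of_mem_items
  · exact hkv
  · exact h

theorem pv_key_inj (td : List (String × List String)) (h : (td.map Prod.fst).Nodup)
    (kv kv' : String × List String) (h1 : kv ∈ td) (h2 : kv' ∈ td) (he : kv.1 = kv'.1) :
    kv = kv' :=
  List.inj_on_of_nodup_map h h1 h2 he

-- A's loop as a filter-map
theorem pv_A_eq (td : List (String × List String)) (ap : List String)
    (h : (td.map Prod.fst).Nodup) :
    search_by_and td ap
      = (td.filter (fun kv => ap.all (fun pop => decide (pop ∈ kv.2)))).map Prod.fst := by
  unfold search_by_and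
  simp only [pv_flag_eq_all, Bool.true_and]
  rw [PySem.List.foldl_append_if]
  simp only [List.nil_append]
  congr 1
  apply List.filter_congr
  intro kv hkv
  rw [pv_lookup_self td h kv hkv]

-- ===== VERDICT (by name: the statement is the Claim_ definition above) =====
theorem search_by_and_spec : Claim_equal_search_by_and := by
  intro td ap _hdom hpre
  unfold Spec_search_by_and
  rw [pv_A_eq td ap hpre]
  unfold search_by_and_alt
  cases ap with
  | nil => simp
  | cons p rest =>
    simp only []
    rw [List.filter_map]
    congr 1
    apply List.filter_congr
    intro kv hkv
    rw [Bool.eq_iff_iff]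
    simp only [List.all_eq_true, decide_eq_true_eq, Function.comp]
    rw [pv_mem_matching]
    constructor
    · intro hall
      refine ⟨(pv_mem_index td p kv.1).mpr ⟨kv, hkv, rfl, hall p List.mem_cons_self⟩, ?_⟩
      intro pop hp
      exact (pv_mem_index td pop kv.1).mpr ⟨kv, hkv, rfl, hall pop (List.mem_cons_of_mem _ hp)⟩
    · rintro ⟨h1, h2⟩ pop hp
      have hx : kv.1 ∈ (pvIndex td).getD pop PySem.Set.empty := by
        rcases List.mem_cons.mp hp with h | h
        · subst h; exact h1
        · exact h2 pop h
      rcases (pv_mem_index td pop kv.1).mp hx with ⟨kv2, hkv2, he, hpop⟩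
      have := pv_key_inj td hpre kv kv2 hkv hkv2 he
      rw [this]; exact hpop
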